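-- pv_equiv track=rewrite | github.com/pypi-data/pypi-mirror-48 | packages/fluxpyt/fluxpyt-0.1.5.tar.gz/fluxpyt-0.1.5/fluxpyt/mid_corr.py | getCoefficients
-- ===== SOURCE A (Python) =====
-- def getCoefficients(pos,molecularFormula):
--     coeff = [];
--     c = 0
--     coeff.append('')
--     for i in pos:
--
--         if i == 0:
--             coeff[-1] = coeff[-1] + molecularFormula[c]
--         elif coeff[-1] != '' :
--             coeff.append('')
--
--         c += 1
--
--
--     return coeff
-- ===== SOURCE B (Python) =====
-- from itertools import groupby
--
-- def getCoefficients(pos, molecularFormula):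
--     coeff = ['']
--     c = 0
--     for is_zero, run in groupby(pos, key=lambda x: x == 0):
--         n = sum(1 for _ in run)
--         if is_zero:
--             coeff[-1] = coeff[-1] + ''.join(molecularFormula[c + j] for j in range(n))
--         elif coeff[-1] != '':
--             coeff.append('')
--         c += n
--     return coeff
-- ===== Notes on version B (the rewrite author's own statement) =====
-- stated objective: alternative
-- what changed: B iterates over maximal runs of pos via itertools.groupby, appending one joined batch of formula entries per zero-run and at most one new group per nonzero-run, instead of A's per-element loop.
import Mathlib
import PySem

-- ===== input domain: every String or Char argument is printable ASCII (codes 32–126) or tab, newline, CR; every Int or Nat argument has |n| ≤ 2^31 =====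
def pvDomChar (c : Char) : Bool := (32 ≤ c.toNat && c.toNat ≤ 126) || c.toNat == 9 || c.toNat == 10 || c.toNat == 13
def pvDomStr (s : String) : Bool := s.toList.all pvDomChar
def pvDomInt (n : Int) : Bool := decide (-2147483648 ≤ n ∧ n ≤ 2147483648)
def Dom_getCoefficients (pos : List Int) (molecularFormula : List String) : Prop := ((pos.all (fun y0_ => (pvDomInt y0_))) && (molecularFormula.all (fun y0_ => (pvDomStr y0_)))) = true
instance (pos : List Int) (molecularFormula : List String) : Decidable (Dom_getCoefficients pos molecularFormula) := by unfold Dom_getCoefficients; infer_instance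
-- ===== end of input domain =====

-- B groups pos into maximal runs (itertools.groupby) and handles each run at once,
-- appending one joined batch of formula entries per zero-run; A walks pos element by element.
-- objective: alternative (same cost, different decomposition).

-- ===== PORT A =====
-- coeff is kept in REVERSED order (head = coeff[-1]); the counter c starts at 0 and is
-- only incremented, so it is tracked as a Nat (same values as Python's int c).
def pvStepA (mf : List String) (st : List String × Nat) (i : Int) : List String × Nat :=
  match st with
  | (rev, c) =>
    if i = 0 then
      ((match rev with
        | cur :: rest => (cur ++ ((PySem.List.pyGet? mf (c : Int)).getD "")) :: rest
        | [] => []), c + 1)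
    else
      ((match rev with
        | cur :: rest => if cur ≠ "" then "" :: cur :: rest else cur :: rest
        | [] => []), c + 1)

def getCoefficients (pos : List Int) (molecularFormula : List String) : List String :=
  ((pos.foldl (pvStepA molecularFormula) ([""], 0)).1).reverse

-- ===== PORT B =====
-- itertools.groupby(pos, key=lambda x: x == 0) as a list of (key, run length):
-- pvRunsGo carries the key and length of the currently open run, exactly as groupby does.
def pvRunsGo (k : Bool) (n : Nat) : List Int → List (Bool × Nat)
  | [] => [(k, n)]
  | x :: xs => if decide (x = 0) = k then pvRunsGo k (n + 1) xs
               else (k, n) :: pvRunsGo (decide (x = 0)) 1 xs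

def pvRuns : List Int → List (Bool × Nat)
  | [] => []
  | x :: xs => pvRunsGo (decide (x = 0)) 1 xs

-- zero-run branch: ''.join(molecularFormula[c + j] for j in range(n))
def pvStepB (mf : List String) (st : List String × Nat) (r : Bool × Nat) : List String × Nat :=
  match st with
  | (rev, c) =>
    if r.1 then
      ((match rev with
        | cur :: rest =>
            (cur ++ String.join ((PySem.List.pyRange 0 (r.2 : Int) 1).map
              (fun j => (PySem.List.pyGet? mf ((c : Int) + j)).getD ""))) :: rest
        | [] => []), c + r.2)
    else
      ((match rev with
        | cur :: rest => if cur ≠ "" then "" :: cur :: rest else cur :: rest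
        | [] => []), c + r.2)

def getCoefficients_alt (pos : List Int) (molecularFormula : List String) : List String :=
  (((pvRuns pos).foldl (pvStepB molecularFormula) ([""], 0)).1).reverse

-- ===== PRECONDITION & SPEC =====
-- Pre_ excludes exactly the inputs on which A raises IndexError (a zero in pos at an index
-- that is not a valid index into molecularFormula); B raises IndexError there as well.
def Pre_getCoefficients (pos : List Int) (molecularFormula : List String) : Prop :=
  ∀ j, (h : j < pos.length) → pos[j] = 0 → j < molecularFormula.length
instance (pos : List Int) (molecularFormula : List String) : Decidable (Pre_getCoefficients pos molecularFormula) := by unfold Pre_getCoefficients; infer_instance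

def pvWitness_getCoefficients : List Int × List String := ([0, 1, 0, 0], ["C", "H2", "O", "N"])

def Spec_getCoefficients (pos : List Int) (molecularFormula : List String) (out : List String) : Prop := out = getCoefficients_alt pos molecularFormula
instance (pos : List Int) (molecularFormula : List String) (out : List String) : Decidable (Spec_getCoefficients pos molecularFormula out) := by unfold Spec_getCoefficients; infer_instance

-- ===== CLAIM =====
def Claim_equal_getCoefficients : Prop := ∀ (pos : List Int) (molecularFormula : List String), Dom_getCoefficients pos molecularFormula → Pre_getCoefficients pos molecularFormula → Spec_getCoefficients pos molecularFormula (getCoefficients pos molecularFormula)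

-- ===== LEMMAS AND PROOFS =====

theorem pv_join_cons (s : String) (l : List String) : String.join (s :: l) = s ++ String.join l := by
  simp [String.join_eq]

-- the indexed range-join of B's zero-run branch equals the joined take/drop slice (in bounds)
theorem pv_range_map (mf : List String) : ∀ (n c : Nat), c + n ≤ mf.length →
    (PySem.List.pyRange 0 (n : Int) 1).map (fun j => (PySem.List.pyGet? mf ((c : Int) + j)).getD "")
      = (mf.drop c).take n := by
  intro n
  induction n with
  | zero => intro c _; simp [PySem.List.pyRange_one_eq_nil]
  | succ n ih =>
    intro c hlen
    have h1 : PySem.List.pyRange 0 ((n : Int) + 1) 1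
        = PySem.List.pyRange 0 (n : Int) 1 ++ [(n : Int)] :=
      PySem.List.pyRange_one_succ_right (by positivity)
    have hcn : c + n < mf.length := by omega
    have hidx : ((c : Int) + n) = ((c + n : Nat) : Int) := by push_cast; ring
    have h2 : (PySem.List.pyGet? mf ((c : Int) + (n : Int))).getD "" = mf[c + n] := by
      rw [hidx, PySem.List.pyGet?_natCast, List.getElem?_eq_getElem hcn]; rfl
    have h3 : (mf.drop c).take (n + 1) = (mf.drop c).take n ++ [mf[c + n]] := by
      have hn : n < (mf.drop c).length := by simp; omega
      rw [List.take_add_one, List.getElem?_eq_getElem hn]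
      simp [List.getElem_drop]
    push_cast
    rw [h1, List.map_append, ih c (by omega), h3]
    simp [h2]

-- run decomposition helpers: first maximal run of key k and the remainder
def pvRunLen (k : Bool) : List Int → Nat
  | [] => 0
  | x :: xs => if decide (x = 0) = k then pvRunLen k xs + 1 else 0

def pvRunRest (k : Bool) : List Int → List Int
  | [] => []
  | x :: xs => if decide (x = 0) = k then pvRunRest k xs else x :: xs

def pvRunPre (k : Bool) : List Int → List Int
  | [] => []
  | x :: xs => if decide (x = 0) = k then x :: pvRunPre k xs else []

theorem pvRunRest_length_le (k : Bool) : ∀ xs : List Int, (pvRunRest k xs).length ≤ xs.length := by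
  intro xs
  induction xs with
  | nil => simp [pvRunRest]
  | cons x xs ih =>
    simp only [pvRunRest]
    split
    · exact Nat.le_succ_of_le ih
    · simp

-- run-splitting restatement of pvRuns, convenient for the induction
def pvRunsW : List Int → List (Bool × Nat)
  | [] => []
  | x :: xs =>
    (decide (x = 0), pvRunLen (decide (x = 0)) xs + 1) :: pvRunsW (pvRunRest (decide (x = 0)) xs)
termination_by xs => xs.length
decreasing_by exact Nat.lt_succ_of_le (pvRunRest_length_le _ _)

theorem pvRunsGo_eq (k : Bool) : ∀ (xs : List Int) (n : Nat),
    pvRunsGo k n xs = (k, n + pvRunLen k xs) :: pvRunsW (pvRunRest k xs) := by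
  intro xs
  induction xs generalizing k with
  | nil => intro n; simp [pvRunsGo, pvRunLen, pvRunRest, pvRunsW]
  | cons x xs ih =>
    intro n
    simp only [pvRunsGo, pvRunLen, pvRunRest]
    by_cases h : decide (x = 0) = k
    · rw [if_pos h, if_pos h, if_pos h, ih k (n + 1)]
      simp; omega
    · rw [if_neg h, if_neg h, if_neg h, ih (decide (x = 0)) 1]
      rw [pvRunsW]
      simp; omega

theorem pvRuns_eq_W : ∀ pos : List Int, pvRuns pos = pvRunsW pos := by
  intro pos
  cases pos with
  | nil => simp [pvRuns, pvRunsW]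
  | cons x xs =>
    rw [pvRuns, pvRunsGo_eq, pvRunsW]
    simp; omega

theorem pvRunPre_append_rest (k : Bool) : ∀ xs : List Int, pvRunPre k xs ++ pvRunRest k xs = xs := by
  intro xs; induction xs with
  | nil => simp [pvRunPre, pvRunRest]
  | cons x xs ih =>
    simp only [pvRunPre, pvRunRest]; split <;> simp [ih]

theorem pvRunPre_length (k : Bool) : ∀ xs : List Int, (pvRunPre k xs).length = pvRunLen k xs := by
  intro xs; induction xs with
  | nil => simp [pvRunPre, pvRunLen]
  | cons x xs ih =>
    simp only [pvRunPre, pvRunLen]; split <;> simp [ih]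

theorem pvRunPre_key (k : Bool) : ∀ xs : List Int, ∀ z ∈ pvRunPre k xs, decide (z = 0) = k := by
  intro xs; induction xs with
  | nil => simp [pvRunPre]
  | cons x xs ih =>
    simp only [pvRunPre]
    split
    · intro z hz
      rcases List.mem_cons.mp hz with h | h
      · subst h; assumption
      · exact ih z h
    · simp

-- a run of zeros: A appends the formula entries one by one; result is the joined take/drop slice
theorem pv_foldA_zeros (mf : List String) : ∀ (zs : List Int) (c : Nat) (cur : String) (rest : List String),
    (∀ z ∈ zs, z = 0) → (c + zs.length ≤ mf.length) →
    zs.foldl (pvStepA mf) (cur :: rest, c)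
      = ((cur ++ String.join ((mf.drop c).take zs.length)) :: rest, c + zs.length) := by
  intro zs
  induction zs with
  | nil => intro c cur rest _ _; simp [String.join]
  | cons z zs ih =>
    intro c cur rest hz hlen
    have hz0 : z = 0 := hz z (List.mem_cons_self ..)
    have hc : c < mf.length := by simp only [List.length_cons] at hlen; omega
    have hstep : pvStepA mf (cur :: rest, c) z = ((cur ++ mf[c]) :: rest, c + 1) := by
      simp [pvStepA, hz0, PySem.List.pyGet?_natCast, List.getElem?_eq_getElem hc]
    rw [List.foldl_cons, hstep, ih (c + 1) _ rest (fun w hw => hz w (List.mem_cons_of_mem _ hw)) (by simp only [List.length_cons] at hlen ⊢; omega)]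
    have hdrop : mf.drop c = mf[c] :: mf.drop (c + 1) := (List.getElem_cons_drop hc).symm
    rw [hdrop]
    simp only [List.take_succ_cons, pv_join_cons, List.length_cons, Prod.mk.injEq]
    constructor
    · rw [String.append_assoc]
    · omega

-- a run of nonzeros with empty current group: no-op on the groups
theorem pv_foldA_nonzeros_empty (mf : List String) : ∀ (zs : List Int) (c : Nat) (rest : List String),
    (∀ z ∈ zs, z ≠ 0) →
    zs.foldl (pvStepA mf) ("" :: rest, c) = ("" :: rest, c + zs.length) := by
  intro zs
  induction zs with
  | nil => intro c rest _; simp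
  | cons z zs ih =>
    intro c rest hz
    have hz0 : z ≠ 0 := hz z (List.mem_cons_self ..)
    have hstep : pvStepA mf ("" :: rest, c) z = ("" :: rest, c + 1) := by
      simp [pvStepA, hz0]
    rw [List.foldl_cons, hstep, ih (c + 1) rest (fun w hw => hz w (List.mem_cons_of_mem _ hw))]
    simp; omega

-- a nonempty run of nonzeros: at most one new empty group is opened
theorem pv_foldA_nonzeros (mf : List String) (zs : List Int) (c : Nat) (cur : String) (rest : List String)
    (hne : zs ≠ []) (hz : ∀ z ∈ zs, z ≠ 0) :
    zs.foldl (pvStepA mf) (cur :: rest, c)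
      = ((if cur ≠ "" then "" :: cur :: rest else cur :: rest), c + zs.length) := by
  cases zs with
  | nil => exact absurd rfl hne
  | cons z zs =>
    have hz0 : z ≠ 0 := hz z (List.mem_cons_self ..)
    have hrest : ∀ w ∈ zs, w ≠ 0 := fun w hw => hz w (List.mem_cons_of_mem _ hw)
    by_cases hcur : cur = ""
    · subst hcur
      have hstep : pvStepA mf ("" :: rest, c) z = ("" :: rest, c + 1) := by simp [pvStepA, hz0]
      rw [List.foldl_cons, hstep, pv_foldA_nonzeros_empty mf zs (c+1) rest hrest]
      simp; omega
    · have hstep : pvStepA mf (cur :: rest, c) z = ("" :: cur :: rest, c + 1) := by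
        simp [pvStepA, hz0, hcur]
      rw [List.foldl_cons, hstep, pv_foldA_nonzeros_empty mf zs (c+1) (cur :: rest) hrest]
      simp [hcur]; omega

-- main invariant: the per-element fold of A equals the per-run fold of B
theorem pv_main (mf : List String) : ∀ (n : Nat) (pos : List Int), pos.length ≤ n →
    ∀ (c : Nat) (cur : String) (rest : List String),
    (∀ j, (h : j < pos.length) → pos[j] = 0 → c + j < mf.length) →
    pos.foldl (pvStepA mf) (cur :: rest, c)
      = (pvRunsW pos).foldl (pvStepB mf) (cur :: rest, c) := by
  intro n
  induction n with
  | zero =>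
    intro pos hlen c cur rest _
    have : pos = [] := List.eq_nil_of_length_eq_zero (Nat.le_zero.mp hlen)
    subst this; simp [pvRunsW]
  | succ n ih =>
    intro pos hlen c cur rest hpre
    cases hp : pos with
    | nil => simp [pvRunsW]
    | cons x xs =>
      subst hp
      set k := decide (x = 0) with hk
      set run := x :: pvRunPre k xs with hrun
      set rest' := pvRunRest k xs with hrest'
      have hsplit : x :: xs = run ++ rest' := by
        simp [hrun, hrest', pvRunPre_append_rest]
      have hrunlen : run.length = pvRunLen k xs + 1 := by
        simp [hrun, pvRunPre_length]
      have hkey : ∀ z ∈ run, decide (z = 0) = k := by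
        intro z hz
        rcases List.mem_cons.mp hz with h | h
        · subst h; rfl
        · exact pvRunPre_key k xs z h
      have hlen' : rest'.length ≤ n := by
        have h1 : rest'.length ≤ xs.length := by rw [hrest']; exact pvRunRest_length_le k xs
        simp only [List.length_cons] at hlen; omega
      have hpre_run : ∀ j, (h : j < run.length) → run[j] = 0 → c + j < mf.length := by
        intro j hj hz
        have h9 : (x :: xs)[j]? = some 0 := by
          rw [hsplit, List.getElem?_append_left hj, List.getElem?_eq_getElem hj, hz]
        have hj' : j < (x :: xs).length := by rw [hsplit, List.length_append]; omega
        rw [List.getElem?_eq_getElem hj'] at h9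
        exact hpre j hj' (by simpa using h9)
      have hpre_rest : ∀ j, (h : j < rest'.length) → rest'[j] = 0 → (c + run.length) + j < mf.length := by
        intro j hj hz
        have h9 : (x :: xs)[run.length + j]? = some 0 := by
          rw [hsplit, List.getElem?_append_right (Nat.le_add_right _ _)]
          simp [List.getElem?_eq_getElem hj, hz]
        have hj' : run.length + j < (x :: xs).length := by rw [hsplit, List.length_append]; omega
        rw [List.getElem?_eq_getElem hj'] at h9
        have := hpre (run.length + j) hj' (by simpa using h9)
        omega
      have hruns : pvRunsW (x :: xs) = (k, pvRunLen k xs + 1) :: pvRunsW rest' := by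
        rw [pvRunsW]
      conv_lhs => rw [hsplit]
      rw [List.foldl_append, hruns]
      conv_rhs => rw [List.foldl_cons]
      rw [← hrunlen]
      by_cases hx : x = 0
      · have hkT : k = true := by simp [hk, hx]
        have hall : ∀ z ∈ run, z = 0 := by
          intro z hz; have := hkey z hz; rw [hkT] at this; simpa using this
        have hbound : c + run.length ≤ mf.length := by
          have hidx : run.length - 1 < run.length := by rw [hrunlen]; omega
          have := hpre_run (run.length - 1) hidx (hall _ (List.getElem_mem hidx))
          omega
        rw [pv_foldA_zeros mf run c cur rest hall hbound]
        have hstepB : pvStepB mf (cur :: rest, c) (k, run.length)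
            = ((cur ++ String.join ((mf.drop c).take run.length)) :: rest, c + run.length) := by
          simp only [pvStepB, hkT, if_pos]
          rw [pv_range_map mf run.length c hbound]
        rw [hstepB]
        exact ih rest' hlen' (c + run.length) _ rest hpre_rest
      · have hkF : k = false := by simp [hk, hx]
        have hall : ∀ z ∈ run, z ≠ 0 := by
          intro z hz; have := hkey z hz; rw [hkF] at this; simpa using this
        rw [pv_foldA_nonzeros mf run c cur rest (by simp [hrun]) hall]
        have hstepB : pvStepB mf (cur :: rest, c) (k, run.length)
            = ((if cur ≠ "" then "" :: cur :: rest else cur :: rest), c + run.length) := by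
          simp [pvStepB, hkF]
        rw [hstepB]
        by_cases hcur : cur = ""
        · simp only [hcur, ne_eq, not_true_eq_false, if_false]
          exact ih rest' hlen' (c + run.length) "" rest hpre_rest
        · simp only [ne_eq, hcur, not_false_eq_true, if_true]
          exact ih rest' hlen' (c + run.length) "" (cur :: rest) hpre_rest

-- ===== VERDICT =====
theorem getCoefficients_spec : Claim_equal_getCoefficients := by
  intro pos mf _ hpre
  unfold Spec_getCoefficients getCoefficients getCoefficients_alt
  rw [pvRuns_eq_W, pv_main mf pos.length pos le_rfl 0 "" [] (by intro j h hz; simpa using hpre j h hz)]
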